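-- pv_equiv track=rewrite | github.com/hyeonjun/AlgorithmTest | Algorithm_Study/Algorithm_Type/Search_Basic_1.py | solution
-- ===== SOURCE A (Python) =====
-- def solution(r, c, castle):
--     row, col = [0] * r, [0] * c
--     answer = [0,0]
--     for i in range(r):
--         for j in range(c):
--             if castle[i][j] == 'X':
--                 row[i] += 1
--                 col[j] += 1
--     for i in range(r):
--         if row[i] == 0:
--             answer[0] += 1
--     for i in range(c):
--         if col[i] == 0:
--             answer[1] += 1
--     return max(answer)
-- ===== SOURCE B (Python) =====
-- def solution(r, c, castle):
--     empty_rows = sum(1 for i in range(r) if all(castle[i][j] != 'X' for j in range(c)))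
--     empty_cols = sum(1 for j in range(c) if all(castle[i][j] != 'X' for i in range(r)))
--     return max(empty_rows, empty_cols)
-- ===== Notes on version B (the rewrite author's own statement) =====
-- stated objective: simpler
-- what changed: B drops A's per-row/per-column X-count tables and the three accumulation loops, instead testing each row and each column directly for emptiness with all() and counting with sum(); same O(r*c) cost, no mutable state.
import Mathlib
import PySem

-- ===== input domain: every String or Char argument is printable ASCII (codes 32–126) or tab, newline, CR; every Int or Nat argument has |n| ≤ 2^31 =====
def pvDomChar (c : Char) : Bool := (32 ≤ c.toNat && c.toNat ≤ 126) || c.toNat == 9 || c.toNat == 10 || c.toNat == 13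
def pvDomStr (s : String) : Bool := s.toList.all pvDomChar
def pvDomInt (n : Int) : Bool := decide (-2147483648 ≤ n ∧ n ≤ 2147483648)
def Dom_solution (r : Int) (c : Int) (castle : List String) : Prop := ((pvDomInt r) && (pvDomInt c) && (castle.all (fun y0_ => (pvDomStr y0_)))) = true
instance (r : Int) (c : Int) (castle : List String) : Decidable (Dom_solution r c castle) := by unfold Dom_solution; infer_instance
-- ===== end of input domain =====

-- B replaces A's per-row/per-column X-count tables and three accumulation loops by direct
-- emptiness tests per row and per column (objective: simpler); same O(r*c) work.

-- ===== PORT A =====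

def solution (r : Int) (c : Int) (castle : List String) : Int :=
  let row : List Int := List.replicate r.toNat 0
  let col : List Int := List.replicate c.toNat 0
  let rc :=
    (PySem.List.pyRange 0 r 1).foldl (fun (st : List Int × List Int) i =>
      (PySem.List.pyRange 0 c 1).foldl (fun (st : List Int × List Int) j =>
        if PySem.Str.pyGet? (PySem.List.pyGetD castle i "") j == some 'X' then
          (st.1.set i.toNat (st.1.getD i.toNat 0 + 1),
           st.2.set j.toNat (st.2.getD j.toNat 0 + 1))
        else st) st) (row, col)
  let answer0 :=
    (PySem.List.pyRange 0 r 1).foldl (fun (a : Int) i =>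
      if PySem.List.pyGetD rc.1 i 0 = 0 then a + 1 else a) 0
  let answer1 :=
    (PySem.List.pyRange 0 c 1).foldl (fun (a : Int) j =>
      if PySem.List.pyGetD rc.2 j 0 = 0 then a + 1 else a) 0
  max answer0 answer1

-- ===== PORT B =====
def solution_alt (r : Int) (c : Int) (castle : List String) : Int :=
  let emptyRows :=
    (PySem.List.pyRange 0 r 1).countP (fun i =>
      (PySem.List.pyRange 0 c 1).all (fun j =>
        !(PySem.Str.pyGet? (PySem.List.pyGetD castle i "") j == some 'X')))
  let emptyCols :=
    (PySem.List.pyRange 0 c 1).countP (fun j =>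
      (PySem.List.pyRange 0 r 1).all (fun i =>
        !(PySem.Str.pyGet? (PySem.List.pyGetD castle i "") j == some 'X')))
  max (emptyRows : Int) (emptyCols : Int)

-- ===== PRECONDITION & SPEC =====
-- Pre_solution excludes exactly the inputs on which the Python A raises IndexError:
-- a positive r,c grid where castle has fewer than r rows or some of the first r rows
-- is shorter than c characters. A returns normally on every other input.
def Pre_solution (r : Int) (c : Int) (castle : List String) : Prop :=
  0 < r → 0 < c → (r ≤ (castle.length : Int) ∧ ∀ s ∈ castle.take r.toNat, c ≤ PySem.Str.len s)
instance (r : Int) (c : Int) (castle : List String) : Decidable (Pre_solution r c castle) := by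
  unfold Pre_solution; infer_instance
def pvWitness_solution : Int × Int × List String := (2, 3, ["X..", "..."])
def Spec_solution (r : Int) (c : Int) (castle : List String) (out : Int) : Prop := out = solution_alt r c castle
instance (r : Int) (c : Int) (castle : List String) (out : Int) : Decidable (Spec_solution r c castle out) := by unfold Spec_solution; infer_instance

-- ===== CLAIM (what is proved, stated in full; the proofs are below) =====
def Claim_equal_solution : Prop := ∀ (r : Int) (c : Int) (castle : List String), Dom_solution r c castle → Pre_solution r c castle → Spec_solution r c castle (solution r c castle)

-- ===== LEMMAS AND PROOFS =====

theorem pv_set_getD_self (l : List Int) (k : Nat) : l.set k (l.getD k 0) = l := by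
  by_cases h : k < l.length
  · simp [List.getD_eq_getElem?_getD, h, List.set_getElem_self h]
  · exact List.set_eq_of_length_le (by omega)

theorem pv_foldl_set_const_idx {α : Type} (f : α → Int) (k : Nat) :
    ∀ (L : List α) (l : List Int),
    L.foldl (fun a j => a.set k (a.getD k 0 + f j)) l = l.set k (l.getD k 0 + (L.map f).sum) := by
  intro L
  induction L with
  | nil => intro l; simp only [List.foldl_nil, List.map_nil, List.sum_nil, add_zero, pv_set_getD_self]
  | cons x L ih =>
    intro l
    simp only [List.foldl_cons, List.map_cons, List.sum_cons, ih]
    by_cases h : k < l.length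
    · rw [List.set_set]
      have : (l.set k (l.getD k 0 + f x)).getD k 0 = l.getD k 0 + f x := by
        simp [List.getD_eq_getElem?_getD, h]
      rw [this]; ring_nf
    · have e1 : ∀ v : Int, l.set k v = l := fun v => List.set_eq_of_length_le (by omega)
      rw [e1, e1, e1]

theorem pv_foldl_set_distinct (f : Nat → Int) (N : Nat) :
    ∀ (n : Nat) (g : Nat → Int), n ≤ N →
    (List.range n).foldl (fun a j => a.set j (a.getD j 0 + f j)) ((List.range N).map g)
      = (List.range N).map (fun j => if j < n then g j + f j else g j) := by
  intro n
  induction n with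
  | zero => intro g _; simp
  | succ n ih =>
    intro g hn
    rw [List.range_succ, List.foldl_append, ih g (by omega)]
    simp only [List.foldl_cons, List.foldl_nil]
    have hgd : ((List.range N).map (fun j => if j < n then g j + f j else g j)).getD n 0 = g n := by
      rw [PySem.List.getD_map_range _ _ _ _ (by omega)]; simp
    rw [hgd]
    apply List.ext_getElem
    · simp
    · intro t ht1 ht2
      simp only [List.length_set, List.length_map, List.length_range] at ht1
      rw [List.getElem_set]
      by_cases h : n = t
      · subst h; simp [List.getElem_map]
      · simp only [if_neg h, List.getElem_map, List.getElem_range]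
        by_cases h2 : t < n
        · rw [if_pos h2, if_pos (by omega)]
        · rw [if_neg h2, if_neg (by omega)]

theorem pv_outer_col {α : Type} (cN : Nat) (ind : α → Nat → Int) :
    ∀ (L : List α) (g : Nat → Int),
    L.foldl (fun co i => (List.range cN).foldl (fun a j => a.set j (a.getD j 0 + ind i j)) co)
        ((List.range cN).map g)
      = (List.range cN).map (fun j => g j + (L.map (fun i => ind i j)).sum) := by
  intro L
  induction L with
  | nil => intro g; simp
  | cons x L ih =>
    intro g
    simp only [List.foldl_cons]
    rw [pv_foldl_set_distinct (ind x) cN cN g (le_refl _)]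
    have h1 : (List.range cN).map (fun j => if j < cN then g j + ind x j else g j)
        = (List.range cN).map (fun j => g j + ind x j) := by
      apply List.map_congr_left; intro a ha; simp [List.mem_range.mp ha]
    rw [h1, ih]
    apply List.map_congr_left; intro a _; simp [List.sum_cons]; ring

theorem pv_replicate_eq_map (N : Nat) :
    List.replicate N (0 : Int) = (List.range N).map (fun _ => 0) := by
  simp [List.map_const']

theorem pv_key (Q : Nat → Nat → Bool) (rN cN : Nat) :
    max
      ((List.range rN).foldl (fun a ki =>
        if ((List.range rN).foldl (fun (st : List Int × List Int) ki =>
              (List.range cN).foldl (fun (st : List Int × List Int) kj =>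
                if Q ki kj then
                  (st.1.set ki (st.1.getD ki 0 + 1), st.2.set kj (st.2.getD kj 0 + 1))
                else st) st)
            (List.replicate rN 0, List.replicate cN 0)).1.getD ki 0 = 0
        then a + 1 else a) 0)
      ((List.range cN).foldl (fun a kj =>
        if ((List.range rN).foldl (fun (st : List Int × List Int) ki =>
              (List.range cN).foldl (fun (st : List Int × List Int) kj =>
                if Q ki kj then
                  (st.1.set ki (st.1.getD ki 0 + 1), st.2.set kj (st.2.getD kj 0 + 1))
                else st) st)
            (List.replicate rN 0, List.replicate cN 0)).2.getD kj 0 = 0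
        then a + 1 else a) 0)
    = max
      (((List.range rN).countP (fun ki => (List.range cN).all (fun kj => !(Q ki kj))) : Int))
      (((List.range cN).countP (fun kj => (List.range rN).all (fun ki => !(Q ki kj))) : Int)) := by
  -- characterize the nested fold
  have h1 : ∀ (ki : Nat) (st : List Int × List Int),
      (List.range cN).foldl (fun (st : List Int × List Int) kj =>
        if Q ki kj then
          (st.1.set ki (st.1.getD ki 0 + 1), st.2.set kj (st.2.getD kj 0 + 1))
        else st) st
      = ((List.range cN).foldl (fun a kj => a.set ki (a.getD ki 0 + if Q ki kj then 1 else 0)) st.1,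
         (List.range cN).foldl (fun a kj => a.set kj (a.getD kj 0 + if Q ki kj then 1 else 0)) st.2) := by
    intro ki st
    have e : (fun (st : List Int × List Int) kj =>
        if Q ki kj then
          (st.1.set ki (st.1.getD ki 0 + 1), st.2.set kj (st.2.getD kj 0 + 1))
        else st)
      = (fun (st : List Int × List Int) kj =>
          (st.1.set ki (st.1.getD ki 0 + if Q ki kj then 1 else 0),
           st.2.set kj (st.2.getD kj 0 + if Q ki kj then 1 else 0))) := by
      funext st kj
      by_cases h : Q ki kj
      · simp only [if_pos h]
      · simp only [if_neg h, add_zero, pv_set_getD_self]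
    rw [e]
    exact PySem.List.foldl_prod_mk
      (fun a kj => a.set ki (a.getD ki 0 + if Q ki kj then 1 else 0))
      (fun a kj => a.set kj (a.getD kj 0 + if Q ki kj then 1 else 0))
      (List.range cN) st.1 st.2
  have h2 : ((List.range rN).foldl (fun (st : List Int × List Int) ki =>
        (List.range cN).foldl (fun (st : List Int × List Int) kj =>
          if Q ki kj then
            (st.1.set ki (st.1.getD ki 0 + 1), st.2.set kj (st.2.getD kj 0 + 1))
          else st) st)
      (List.replicate rN 0, List.replicate cN 0))
    = ((List.range rN).map (fun ki =>
          if ki < rN then (0:Int) + (((List.range cN).countP (Q ki)) : Int) else 0),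
       (List.range cN).map (fun kj =>
          (0:Int) + (((List.range rN).countP (fun ki => Q ki kj)) : Int))) := by
    have eouter : (fun (st : List Int × List Int) ki =>
        (List.range cN).foldl (fun (st : List Int × List Int) kj =>
          if Q ki kj then
            (st.1.set ki (st.1.getD ki 0 + 1), st.2.set kj (st.2.getD kj 0 + 1))
          else st) st)
      = (fun (st : List Int × List Int) ki =>
          ((List.range cN).foldl (fun a kj => a.set ki (a.getD ki 0 + if Q ki kj then 1 else 0)) st.1,
           (List.range cN).foldl (fun a kj => a.set kj (a.getD kj 0 + if Q ki kj then 1 else 0)) st.2)) := by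
      funext st ki; exact h1 ki st
    rw [eouter]
    refine Eq.trans (PySem.List.foldl_prod_mk
      (fun (a : List Int) ki => (List.range cN).foldl (fun b kj => b.set ki (b.getD ki 0 + if Q ki kj then 1 else 0)) a)
      (fun (a : List Int) ki => (List.range cN).foldl (fun b kj => b.set kj (b.getD kj 0 + if Q ki kj then 1 else 0)) a)
      (List.range rN) (List.replicate rN (0:Int)) (List.replicate cN (0:Int))) ?_
    refine congrArg₂ Prod.mk ?_ ?_
    · -- row component
      have erow : (fun (a : List Int) (ki : Nat) =>
          (List.range cN).foldl (fun b kj => b.set ki (b.getD ki 0 + if Q ki kj then 1 else 0)) a)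
        = (fun (a : List Int) (ki : Nat) =>
            a.set ki (a.getD ki 0 + (((List.range cN).countP (Q ki)) : Int))) := by
        funext a ki
        rw [pv_foldl_set_const_idx (fun kj => if Q ki kj then (1:Int) else 0) ki (List.range cN) a,
            PySem.List.sum_map_ite_one_zero]
      rw [erow, pv_replicate_eq_map,
          pv_foldl_set_distinct (fun ki => (((List.range cN).countP (Q ki)) : Int)) rN rN _ le_rfl]
    · -- col component
      rw [pv_replicate_eq_map]
      refine Eq.trans (pv_outer_col cN (fun ki kj => if Q ki kj then (1:Int) else 0) (List.range rN) (fun _ => 0)) ?_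
      apply List.map_congr_left; intro kj _
      rw [PySem.List.sum_map_ite_one_zero]
  rw [h2]
  simp only [PySem.List.foldl_ite_add_one, zero_add]
  have hrow : ∀ ki ∈ List.range rN,
      (decide (((List.range rN).map (fun ki =>
          if ki < rN then (((List.range cN).countP (Q ki)) : Int) else 0)).getD ki 0 = 0))
      = (List.range cN).all (fun kj => !(Q ki kj)) := by
    intro ki hki
    rw [PySem.List.getD_map_range _ _ _ _ (List.mem_range.mp hki), if_pos (List.mem_range.mp hki)]
    rw [Bool.eq_iff_iff]; simp [List.countP_eq_zero, List.all_eq_true]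
  have hcol : ∀ kj ∈ List.range cN,
      (decide (((List.range cN).map (fun kj =>
          (((List.range rN).countP (fun ki => Q ki kj)) : Int))).getD kj 0 = 0))
      = (List.range rN).all (fun ki => !(Q ki kj)) := by
    intro kj hkj
    rw [PySem.List.getD_map_range _ _ _ _ (List.mem_range.mp hkj)]
    rw [Bool.eq_iff_iff]; simp [List.countP_eq_zero, List.all_eq_true]
  refine congrArg₂ max ?_ ?_
  · exact congrArg _ (List.countP_congr (fun x hx => by rw [hrow x hx]))
  · exact congrArg _ (List.countP_congr (fun x hx => by rw [hcol x hx]))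

theorem pv_main_eq (r c : Int) (castle : List String) : solution r c castle = solution_alt r c castle := by
  simp only [solution, solution_alt, PySem.List.pyRange_one, List.foldl_map, List.countP_map,
    List.all_map, zero_add, sub_zero, Int.toNat_natCast, PySem.List.pyGetD_natCast,
    Function.comp_def]
  exact pv_key (fun ki kj => PySem.Str.pyGet? (castle.getD ki "") (kj : Int) == some 'X')
    r.toNat c.toNat

-- ===== VERDICT (by name: the statement is the Claim_ definition above) =====
theorem solution_spec : Claim_equal_solution := by
  intro r c castle _ _
  show solution r c castle = solution_alt r c castle
  exact pv_main_eq r c castle
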